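-- pv_equiv track=rewrite | github.com/djoshuac/competitive-programming | codeforces/859/C/solution_c.py | maximum_pie_consumption
-- ===== SOURCE A (Python) =====
-- def maximum_pie_consumption(pies):
--     c = len(pies) - 1
--     toke = wait = 0
--     for p in reversed(pies):
--         if toke < p + wait:
--             toke, wait = wait + p, toke
--         else:
--             wait += p
--     return wait, toke
-- ===== SOURCE B (Python) =====
-- def maximum_pie_consumption(pies):
--     # Pass 1: suffix sums of the pies (from the last pie backwards).
--     suffix = []
--     total = 0
--     for p in reversed(pies):
--         total += p
--         suffix.append(total)
--     # Pass 2: dp = best value the player in control of a suffix can get,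
--     # via the closed recurrence dp = max(dp, S - dp) over the suffix sums.
--     dp = 0
--     for s in suffix:
--         dp = max(dp, s - dp)
--     return total - dp, dp
-- ===== Notes on version B (the rewrite author's own statement) =====
-- stated objective: alternative
-- what changed: Replaces the two rolling accumulators with a conditional swap by an explicit suffix-sum pass followed by the closed max-recurrence dp = max(dp, S - dp), returning (total - dp, dp).
import Mathlib
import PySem

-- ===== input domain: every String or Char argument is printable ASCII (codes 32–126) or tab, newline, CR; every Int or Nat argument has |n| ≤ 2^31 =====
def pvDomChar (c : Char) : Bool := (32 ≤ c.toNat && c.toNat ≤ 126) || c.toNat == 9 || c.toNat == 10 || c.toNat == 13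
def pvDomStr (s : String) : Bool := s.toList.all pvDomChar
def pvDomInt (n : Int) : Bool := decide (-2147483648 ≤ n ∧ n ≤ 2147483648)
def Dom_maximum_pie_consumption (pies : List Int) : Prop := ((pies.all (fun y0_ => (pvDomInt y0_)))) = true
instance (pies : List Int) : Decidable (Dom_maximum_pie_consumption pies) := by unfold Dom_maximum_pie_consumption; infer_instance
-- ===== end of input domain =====

-- B replaces A's two rolling accumulators with a suffix-sum pass plus the closed
-- max-recurrence dp = max(dp, S - dp); same O(n) cost, different decomposition.

-- ===== PORT A =====
def maximum_pie_consumption (pies : List Int) : Int × Int :=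
  let _c : Int := (pies.length : Int) - 1   -- A's unused 'c'
  let r := pies.reverse.foldl
    (fun (tw : Int × Int) p =>
      if tw.1 < p + tw.2 then (tw.2 + p, tw.1) else (tw.1, tw.2 + p)) (0, 0)
  (r.2, r.1)

-- ===== PORT B =====
def maximum_pie_consumption_alt (pies : List Int) : Int × Int :=
  let pair := pies.reverse.foldl
    (fun (acc : Int × List Int) p => (acc.1 + p, acc.2 ++ [acc.1 + p])) (0, [])
  let total := pair.1
  let dp := pair.2.foldl (fun dp s => max dp (s - dp)) 0
  (total - dp, dp)

-- ===== PRECONDITION & SPEC =====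
def Spec_maximum_pie_consumption (pies : List Int) (out : Int × Int) : Prop := out = maximum_pie_consumption_alt pies
instance (pies : List Int) (out : Int × Int) : Decidable (Spec_maximum_pie_consumption pies out) := by unfold Spec_maximum_pie_consumption; infer_instance

-- ===== CLAIM (what is proved, stated in full; the proofs are below) =====
def Claim_equal_maximum_pie_consumption : Prop := ∀ (pies : List Int), Dom_maximum_pie_consumption pies → Spec_maximum_pie_consumption pies (maximum_pie_consumption pies)

-- ===== LEMMAS AND PROOFS =====

-- prefix sums of l starting from running total s0 (the list B's first pass appends)
def pvSums (s0 : Int) : List Int → List Int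
  | [] => []
  | p :: l => (s0 + p) :: pvSums (s0 + p) l

lemma pvPair_eq (l : List Int) : ∀ (s0 : Int) (acc : List Int),
    l.foldl (fun (acc : Int × List Int) p => (acc.1 + p, acc.2 ++ [acc.1 + p])) (s0, acc)
      = (s0 + l.sum, acc ++ pvSums s0 l) := by
  induction l with
  | nil => intro s0 acc; simp [pvSums]
  | cons p l ih =>
      intro s0 acc
      simp only [List.foldl_cons, List.sum_cons, pvSums, ih]
      simp only [Prod.mk.injEq]
      exact ⟨by ring, by simp⟩

lemma pvFoldA_eq (l : List Int) : ∀ (t w : Int),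
    l.foldl (fun (tw : Int × Int) p =>
        if tw.1 < p + tw.2 then (tw.2 + p, tw.1) else (tw.1, tw.2 + p)) (t, w)
      = (pvSums (t + w) l |>.foldl (fun dp s => max dp (s - dp)) t,
         t + w + l.sum - (pvSums (t + w) l |>.foldl (fun dp s => max dp (s - dp)) t)) := by
  induction l with
  | nil => intro t w; simp [pvSums]
  | cons p l ih =>
      intro t w
      simp only [List.foldl_cons, pvSums, List.sum_cons]
      by_cases h : t < p + w
      · rw [if_pos h, ih]
        have h1 : max t (t + w + p - t) = w + p := by omega
        have h2 : w + p + t = t + w + p := by ring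
        rw [h1, h2]
        simp only [Prod.mk.injEq]
        exact ⟨trivial, by ring_nf⟩
      · rw [if_neg h, ih]
        have h1 : max t (t + w + p - t) = t := by omega
        have h2 : t + (w + p) = t + w + p := by ring
        rw [h1, h2]
        simp only [Prod.mk.injEq]
        exact ⟨trivial, by ring_nf⟩

-- ===== VERDICT (by name: the statement is the Claim_ definition above) =====
theorem maximum_pie_consumption_spec : Claim_equal_maximum_pie_consumption := by
  intro pies _
  unfold Spec_maximum_pie_consumption maximum_pie_consumption maximum_pie_consumption_alt
  simp only [pvPair_eq, pvFoldA_eq]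
  simp
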